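-- pv_equiv track=rewrite | github.com/eckelsjd-rose-old/csse120 | Exam1/src/problem1.py | product_of_digits
-- ===== SOURCE A (Python) =====
-- def product_of_digits(number, digit_to_skip):
--     """
--     What comes in:
--       -- number (a positive integer)
--       -- digit_to_skip (a digit, that is, either 0, 1, 2, 3, ... or 9)
--     What goes out:  The product of the digits in the given number,
--       but with any instances of the "digit_to_skip" ignored.
--     Side effects:   None.
--     Examples:
--       -- product_of_integers(83135, 3)
--            returns (8 * 1 * 5), which is 40        (the 3s were ignored).
--
--       -- product_of_integers(83135, 8)
--            returns (1 * 3 * 3 * 5), which is 45    (the 8 was ignored).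
--
--       -- product_of_integers(2255, 5)
--            returns (2 * 2), which is 4             (the 5s were ignored).
--
--       -- product_of_integers(234, 7)
--            returns (2 * 3 * 4), which is 24        (there are no 7s to ignore).
--
--       -- product_of_integers(204, 7)
--            returns (2 * 0 * 4), which is 0
--
--       -- product_of_integers(2040, 0)
--            returns (2 * 4), which is 8             (the 0s are ignored).
--     """
--     digit_product = 1
--     remaining_number = number
--     while True:
--         if remaining_number == 0:
--             break
--         if remaining_number % 10 != digit_to_skip:
--             digit_product = digit_product * (remaining_number % 10)
--         remaining_number = remaining_number // 10
--
--     return digit_product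
-- ===== SOURCE B (Python) =====
-- def product_of_digits(number, digit_to_skip):
--     product = 1
--     for ch in str(number):
--         d = int(ch)
--         if d != digit_to_skip:
--             product = product * d
--     return product
-- ===== Notes on version B (the rewrite author's own statement) =====
-- stated objective: idiomatic
-- what changed: B extracts the digits by iterating over the characters of str(number) (big-endian) instead of A's arithmetic while-loop peeling digits with % 10 and // 10 (little-endian).
-- intended difference: For number = 0 with digit_to_skip != 0, A returns 1 because its loop body never runs, while B returns 0, the product of the one written digit 0 of '0'; the docstring restricts number to positive integers so this corner is unspecified and B's value reflects the actual digits. — e.g. on product_of_digits(0, 5): A returns 1, B returns 0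
import Mathlib
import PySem

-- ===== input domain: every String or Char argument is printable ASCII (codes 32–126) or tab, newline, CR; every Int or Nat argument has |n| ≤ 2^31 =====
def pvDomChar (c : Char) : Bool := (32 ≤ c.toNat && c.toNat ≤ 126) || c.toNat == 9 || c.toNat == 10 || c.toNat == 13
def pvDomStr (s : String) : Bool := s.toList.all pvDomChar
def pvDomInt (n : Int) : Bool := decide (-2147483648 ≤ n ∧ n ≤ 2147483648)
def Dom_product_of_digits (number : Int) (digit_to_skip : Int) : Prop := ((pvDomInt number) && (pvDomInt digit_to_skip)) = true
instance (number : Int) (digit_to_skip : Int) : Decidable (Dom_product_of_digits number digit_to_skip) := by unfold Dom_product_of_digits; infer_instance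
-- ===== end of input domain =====

-- B recomputes the digit product from the characters of str(number) instead of A's %10/÷10
-- while-loop (idiomatic rewrite, return value only; on number = 0 with digit_to_skip ≠ 0 B
-- returns 0 — the product of the written digit — where A returns 1, see D_ below).

-- ===== PORT A =====
-- A's 'while True' loop; the fuel number.natAbs + 1 is only a termination bound: for any
-- number ≥ 0 (Pre_) the loop runs at most that many iterations, so the fuel never binds there.
def podLoop (fuel : Nat) (remaining : Int) (digit_product : Int) (digit_to_skip : Int) : Int :=
  match fuel with
  | 0 => digit_product
  | fuel + 1 =>
    if remaining = 0 then digit_product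
    else
      podLoop fuel (PySem.Int.floordiv remaining 10)
        (if PySem.Int.mod remaining 10 ≠ digit_to_skip
         then digit_product * PySem.Int.mod remaining 10 else digit_product)
        digit_to_skip

def product_of_digits (number : Int) (digit_to_skip : Int) : Int :=
  podLoop (number.natAbs + 1) number 1 digit_to_skip

-- ===== PORT B =====
-- int(ch) for one character: exact on the digit characters '0'..'9', the only characters of
-- str(number) for number ≥ 0 (Pre_).
def pyDigitVal (c : Char) : Int := (c.toNat : Int) - 48

def product_of_digits_alt (number : Int) (digit_to_skip : Int) : Int :=
  (PySem.Int.toStr number).toList.foldl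
    (fun p c => if pyDigitVal c ≠ digit_to_skip then p * pyDigitVal c else p) 1

-- ===== PRECONDITION & SPEC =====
-- A's loop never terminates for negative number (remaining // 10 reaches and stays at -1),
-- so Pre_ admits exactly the nonnegative inputs, on which A returns.
def Pre_product_of_digits (number : Int) (digit_to_skip : Int) : Prop := 0 ≤ number
instance (number : Int) (digit_to_skip : Int) : Decidable (Pre_product_of_digits number digit_to_skip) := by unfold Pre_product_of_digits; infer_instance

def pvWitness_product_of_digits : Int × Int := (83135, 3)

-- For number = 0 with digit_to_skip ≠ 0, A returns 1 because its loop body never runs, while B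
-- returns 0, the product of the one written digit 0 of '0'; the docstring restricts number to
-- positive integers, so this corner is unspecified and B's value reflects the actual digits.
def D_product_of_digits (number : Int) (digit_to_skip : Int) : Prop :=
  number = 0 ∧ digit_to_skip ≠ 0
instance (number : Int) (digit_to_skip : Int) : Decidable (D_product_of_digits number digit_to_skip) := by unfold D_product_of_digits; infer_instance

def Spec_product_of_digits (number : Int) (digit_to_skip : Int) (out : Int) : Prop := ¬ D_product_of_digits number digit_to_skip → out = product_of_digits_alt number digit_to_skip
instance (number : Int) (digit_to_skip : Int) (out : Int) : Decidable (Spec_product_of_digits number digit_to_skip out) := by unfold Spec_product_of_digits; infer_instance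

def pvDiffWitness_product_of_digits : Int × Int := (0, 5)
def pvDiffWitnessOut_product_of_digits : Int × Int := (1, 0)

-- ===== CLAIM (what is proved, stated in full; the proofs are below) =====
def Claim_unchanged_product_of_digits : Prop := ∀ (number : Int) (digit_to_skip : Int), Dom_product_of_digits number digit_to_skip → Pre_product_of_digits number digit_to_skip → Spec_product_of_digits number digit_to_skip (product_of_digits number digit_to_skip)
def Claim_changed_product_of_digits : Prop := Dom_product_of_digits (pvDiffWitness_product_of_digits.1) (pvDiffWitness_product_of_digits.2) ∧ Pre_product_of_digits (pvDiffWitness_product_of_digits.1) (pvDiffWitness_product_of_digits.2) ∧ D_product_of_digits (pvDiffWitness_product_of_digits.1) (pvDiffWitness_product_of_digits.2) ∧ product_of_digits (pvDiffWitness_product_of_digits.1) (pvDiffWitness_product_of_digits.2) = pvDiffWitnessOut_product_of_digits.1 ∧ product_of_digits_alt (pvDiffWitness_product_of_digits.1) (pvDiffWitness_product_of_digits.2) = pvDiffWitnessOut_product_of_digits.2 ∧ pvDiffWitnessOut_product_of_digits.1 ≠ pvDiffWitnessOut_product_of_digits.2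
def Claim_exact_product_of_digits : Prop := ∀ (number : Int) (digit_to_skip : Int), Dom_product_of_digits number digit_to_skip → Pre_product_of_digits number digit_to_skip → D_product_of_digits number digit_to_skip → product_of_digits number digit_to_skip ≠ product_of_digits_alt number digit_to_skip

-- ===== LEMMAS AND PROOFS =====

-- the factor a digit d contributes to the product
def dval (skip d : Int) : Int := if d ≠ skip then d else 1

-- little-endian digit product, the invariant of A's loop
def natProd (skip : Int) (n : Nat) : Int :=
  if h : n = 0 then 1 else dval skip ((n % 10 : Nat) : Int) * natProd skip (n / 10)
decreasing_by exact Nat.div_lt_self (Nat.pos_of_ne_zero h) (by norm_num)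

-- big-endian decimal digit characters of n (with rep 0 = ['0'])
def rep (n : Nat) : List Char :=
  if n < 10 then [Nat.digitChar n] else rep (n / 10) ++ [Nat.digitChar (n % 10)]
decreasing_by exact Nat.div_lt_self (by omega) (by norm_num)

lemma toDigitsCore_eq_rep (f n : Nat) (acc : List Char) (h : n < f) :
    Nat.toDigitsCore 10 f n acc = rep n ++ acc := by
  induction f generalizing n acc with
  | zero => omega
  | succ f ih =>
    rw [Nat.toDigitsCore]
    by_cases h10 : n / 10 = 0
    · have hn : n < 10 := by omega
      simp [h10, rep, hn, Nat.mod_eq_of_lt hn]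
    · have hn : ¬ n < 10 := by omega
      rw [if_neg h10, ih (n / 10) _ (by omega)]
      conv_rhs => rw [rep, if_neg hn]
      simp

lemma digitVal_digitChar (d : Nat) (h : d < 10) : pyDigitVal (Nat.digitChar d) = (d : Int) := by
  interval_cases d <;> decide

lemma foldl_rep (skip : Int) (n : Nat) (hn : n ≠ 0) :
    (rep n).foldl (fun p c => if pyDigitVal c ≠ skip then p * pyDigitVal c else p) 1
      = natProd skip n := by
  induction n using Nat.strong_induction_on with
  | _ n ih =>
    by_cases h10 : n < 10
    · rw [rep, if_pos h10]
      conv_rhs => rw [natProd, dif_neg hn]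
      conv_rhs => rw [natProd, dif_pos (by omega : n / 10 = 0)]
      have := digitVal_digitChar n h10
      simp only [List.foldl_cons, List.foldl_nil, this, dval]
      have : n % 10 = n := Nat.mod_eq_of_lt h10
      rw [this]
      split_ifs <;> ring
    · rw [rep, if_neg h10]
      rw [List.foldl_append]
      rw [ih (n / 10) (Nat.div_lt_self (by omega) (by norm_num)) (by omega)]
      conv_rhs => rw [natProd, dif_neg hn]
      have hm : n % 10 < 10 := Nat.mod_lt _ (by norm_num)
      simp only [List.foldl_cons, List.foldl_nil, digitVal_digitChar _ hm, dval]
      split_ifs <;> ring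

lemma podLoop_eq (skip : Int) (f : Nat) (n : Nat) (p : Int) (h : n < f) :
    podLoop f (n : Int) p skip = p * natProd skip n := by
  induction f generalizing n p with
  | zero => omega
  | succ f ih =>
    rw [podLoop]
    by_cases h0 : n = 0
    · subst h0
      rw [natProd]
      simp
    · have hne : (n : Int) ≠ 0 := by exact_mod_cast h0
      rw [if_neg hne]
      have hfd : PySem.Int.floordiv (n : Int) 10 = ((n / 10 : Nat) : Int) := by
        unfold PySem.Int.floordiv
        rw [Int.fdiv_eq_ediv, if_pos (Or.inl (by norm_num : (0:Int) ≤ 10))]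
        omega
      have hfm : PySem.Int.mod (n : Int) 10 = ((n % 10 : Nat) : Int) := by
        unfold PySem.Int.mod
        rw [Int.fmod_eq_emod, if_pos (Or.inl (by norm_num : (0:Int) ≤ 10))]
        omega
      rw [hfd, hfm, ih (n / 10) _ (by omega)]
      conv_rhs => rw [natProd, dif_neg h0]
      unfold dval
      split_ifs <;> ring

lemma alt_eq_natProd (number skip : Int) (h : 0 ≤ number) (hne : number ≠ 0) :
    product_of_digits_alt number skip = natProd skip number.toNat := by
  unfold product_of_digits_alt
  have hlt : ¬ number < 0 := by omega
  rw [PySem.Int.toList_toStr]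
  unfold PySem.Int.toChars
  rw [if_neg hlt]
  unfold Nat.toDigits
  rw [toDigitsCore_eq_rep _ _ _ (by omega)]
  rw [List.append_nil]
  exact foldl_rep skip _ (by omega)

lemma a_eq_natProd (number skip : Int) (h : 0 ≤ number) :
    product_of_digits number skip = natProd skip number.toNat := by
  unfold product_of_digits
  have h1 : number = ((number.toNat : Nat) : Int) := (Int.toNat_of_nonneg h).symm
  have h2 : number.natAbs = number.toNat := by omega
  rw [h2]
  conv_lhs => rw [h1]
  rw [podLoop_eq skip _ _ _ (by omega)]
  ring

-- ===== VERDICT (by name: the statement is the Claim_ definition above) =====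
theorem product_of_digits_spec : Claim_unchanged_product_of_digits := by
  intro number skip _ hpre hnd
  by_cases h0 : number = 0
  · have hskip : skip = 0 := by
      by_contra hs
      exact hnd ⟨h0, hs⟩
    subst h0; subst hskip
    decide
  · rw [a_eq_natProd number skip hpre, alt_eq_natProd number skip hpre h0]

theorem product_of_digits_changed : Claim_changed_product_of_digits := by
  unfold Claim_changed_product_of_digits; decide

theorem product_of_digits_tight : Claim_exact_product_of_digits := by
  intro number skip _ _ hd
  obtain ⟨h0, hs⟩ := hd
  subst h0
  have hA : product_of_digits 0 skip = 1 := by simp [product_of_digits, podLoop]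
  have hB : product_of_digits_alt 0 skip = 0 := by
    unfold product_of_digits_alt
    rw [(by decide : (PySem.Int.toStr 0).toList = ['0'])]
    simp only [List.foldl_cons, List.foldl_nil]
    rw [(by decide : pyDigitVal '0' = (0 : Int))]
    rw [if_pos (show (0 : Int) ≠ skip from fun h => hs h.symm)]
    ring
  rw [hA, hB]
  norm_num
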